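-- pv_equiv track=rewrite | github.com/manuelmhs/algorithms-practice | Python/Misc/ZeroSumTriplet.py | hashmapOptimization
-- ===== SOURCE A (Python) =====
-- def hashmapOptimization(arr):
--     l = len(arr)
--     i_s = set()
--     for j in range(l-1): # we only need two loops
--         for k in range(j+1, l):
--             target = -(arr[j] + arr[k])
--
--             if target in i_s:
--                 return True
--
--         # when we finished using j index, we add it as a i index to the hashmap, not earlier
--         # this is because we need a triplet such that i < j < k, i = j < k wouldn't be a correct answer
--         if not arr[j] in i_s:
--             i_s.add(arr[j])
--
--     return False
-- ===== SOURCE B (Python) =====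
-- def hashmapOptimization(arr):
--     s = sorted(arr)
--     n = len(s)
--     for p in range(n - 2):
--         lo, hi = p + 1, n - 1
--         while lo < hi:
--             t = s[p] + s[lo] + s[hi]
--             if t == 0:
--                 return True
--             if t < 0:
--                 lo += 1
--             else:
--                 hi -= 1
--     return False
-- ===== Notes on version B (the rewrite author's own statement) =====
-- stated objective: alternative
-- what changed: Replaced the incremental hash-set double loop (seen-prefix lookup of -(a[j]+a[k])) by sorting a copy and running a converging two-pointer scan for each anchor index; only the existence result is kept.
import Mathlib
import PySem

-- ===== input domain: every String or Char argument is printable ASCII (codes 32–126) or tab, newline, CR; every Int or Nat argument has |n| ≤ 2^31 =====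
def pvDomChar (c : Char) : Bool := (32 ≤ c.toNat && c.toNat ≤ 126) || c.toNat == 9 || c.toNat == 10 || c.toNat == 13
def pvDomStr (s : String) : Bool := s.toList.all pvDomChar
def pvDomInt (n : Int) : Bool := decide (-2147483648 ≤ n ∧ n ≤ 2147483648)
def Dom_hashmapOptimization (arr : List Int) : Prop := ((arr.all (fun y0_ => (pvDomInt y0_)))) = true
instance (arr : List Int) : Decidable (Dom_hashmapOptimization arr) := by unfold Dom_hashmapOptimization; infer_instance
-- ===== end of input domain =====

-- B replaces A's incremental hash-set double loop by sort + converging two pointers (arr is never mutated).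

-- ===== PORT A =====
-- outer 'for j in range(l-1)' with early return; s is the Python set i_s
def aLoop (arr : List Int) (s : PySem.Set Int) : List Int → Bool
  | [] => false
  | j :: js =>
    -- inner 'for k in range(j+1, l): if target in i_s: return True'
    if (PySem.List.pyRange (j + 1) (arr.length : Int) 1).any
        (fun k => s.contains (-(PySem.List.pyGetD arr j 0 + PySem.List.pyGetD arr k 0))) then
      true
    else
      aLoop arr
        (if s.contains (PySem.List.pyGetD arr j 0) then s
         else s.add (PySem.List.pyGetD arr j 0)) js

def hashmapOptimization (arr : List Int) : Bool :=
  aLoop arr PySem.Set.empty (PySem.List.pyRange 0 ((arr.length : Int) - 1) 1)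

-- ===== PORT B =====
-- 'while lo < hi' of Source B (indices are always in range; the pyGetD default is never used)
def bWhile (s : List Int) (x lo hi : Int) : Bool :=
  if lo < hi then
    let t := x + PySem.List.pyGetD s lo 0 + PySem.List.pyGetD s hi 0
    if t = 0 then true
    else if t < 0 then bWhile s x (lo + 1) hi
    else bWhile s x lo (hi - 1)
  else false
termination_by (hi - lo).toNat
decreasing_by all_goals omega

def hashmapOptimization_alt (arr : List Int) : Bool :=
  let s := PySem.List.sorted arr (fun x => x) false
  let n : Int := s.length
  (PySem.List.pyRange 0 (n - 2) 1).any
    (fun p => bWhile s (PySem.List.pyGetD s p 0) (p + 1) (n - 1))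

-- ===== PRECONDITION & SPEC =====
def Spec_hashmapOptimization (arr : List Int) (out : Bool) : Prop := out = hashmapOptimization_alt arr
instance (arr : List Int) (out : Bool) : Decidable (Spec_hashmapOptimization arr out) := by unfold Spec_hashmapOptimization; infer_instance

-- ===== CLAIM (what is proved, stated in full; the proofs are below) =====
def Claim_equal_hashmapOptimization : Prop := ∀ (arr : List Int), Dom_hashmapOptimization arr → Spec_hashmapOptimization arr (hashmapOptimization arr)

-- ===== LEMMAS AND PROOFS =====

-- 'xs has a zero-sum triplet at indices i < j < k'
def HasTrip (xs : List Int) : Prop :=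
  ∃ i j k : Nat, i < j ∧ j < k ∧ k < xs.length ∧
    xs.getD i 0 + xs.getD j 0 + xs.getD k 0 = 0

lemma any_pyRange_iff (a b : Int) (f : Int → Bool) :
    ((PySem.List.pyRange a b 1).any f = true) ↔ ∃ x : Int, a ≤ x ∧ x < b ∧ f x = true := by
  simp [List.any_eq_true, PySem.List.mem_pyRange_one]
  tauto

lemma mem_take_iff (arr : List Int) (j0 : Nat) (x : Int) :
    x ∈ arr.take j0 ↔ ∃ i : Nat, i < j0 ∧ i < arr.length ∧ arr.getD i 0 = x := by
  rw [List.mem_iff_getElem]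
  constructor
  · rintro ⟨i, hi, rfl⟩
    have hlen := hi
    simp only [List.length_take, lt_min_iff] at hlen
    exact ⟨i, hlen.1, hlen.2, by rw [List.getD_eq_getElem _ _ hlen.2, List.getElem_take]⟩
  · rintro ⟨i, h1, h2, rfl⟩
    exact ⟨i, by simp [List.length_take]; omega,
      by rw [List.getElem_take, List.getD_eq_getElem _ _ h2]⟩

-- invariant of A's outer loop: when j0 prefixes are in the set and j runs from j0,
-- the loop succeeds iff a zero-sum triplet with middle index ≥ j0 exists
lemma aLoop_iff (arr : List Int) : ∀ n (j0 : Nat), arr.length - j0 = n →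
    (aLoop arr (PySem.Set.ofList (arr.take j0))
        (PySem.List.pyRange (j0 : Int) ((arr.length : Int) - 1) 1) = true
      ↔ ∃ i j k : Nat, j0 ≤ j ∧ i < j ∧ j < k ∧ k < arr.length ∧
          arr.getD i 0 + arr.getD j 0 + arr.getD k 0 = 0) := by
  intro n
  induction n using Nat.strong_induction_on with
  | _ n ih =>
    intro j0 hn
    by_cases hlt : (j0 : Int) < (arr.length : Int) - 1
    · rw [PySem.List.pyRange_one_cons hlt]
      rw [aLoop]
      have hj0 : j0 + 1 < arr.length := by omega
      -- the inner loop condition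
      have hcond : ((PySem.List.pyRange ((j0 : Int) + 1) (arr.length : Int) 1).any
          (fun k => (PySem.Set.ofList (arr.take j0)).contains
            (-(PySem.List.pyGetD arr (j0 : Int) 0 + PySem.List.pyGetD arr k 0))) = true)
          ↔ ∃ i k : Nat, i < j0 ∧ j0 < k ∧ k < arr.length ∧
              arr.getD i 0 + arr.getD j0 0 + arr.getD k 0 = 0 := by
        rw [any_pyRange_iff]
        constructor
        · rintro ⟨x, hx1, hx2, hx⟩
          obtain ⟨k, rfl⟩ : ∃ k : Nat, (k : Int) = x := ⟨x.toNat, by omega⟩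
          rw [PySem.List.pyGetD_natCast, PySem.List.pyGetD_natCast] at hx
          rw [PySem.Set.contains_iff, PySem.Set.mem_ofList, mem_take_iff] at hx
          obtain ⟨i, h1, h2, h3⟩ := hx
          exact ⟨i, k, h1, by omega, by omega, by omega⟩
        · rintro ⟨i, k, h1, h2, h3, h4⟩
          refine ⟨(k : Int), by omega, by omega, ?_⟩
          rw [PySem.List.pyGetD_natCast, PySem.List.pyGetD_natCast]
          rw [PySem.Set.contains_iff, PySem.Set.mem_ofList, mem_take_iff]
          exact ⟨i, h1, by omega, by omega⟩
      by_cases hc : (PySem.List.pyRange ((j0 : Int) + 1) (arr.length : Int) 1).any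
          (fun k => (PySem.Set.ofList (arr.take j0)).contains
            (-(PySem.List.pyGetD arr (j0 : Int) 0 + PySem.List.pyGetD arr k 0))) = true
      · rw [if_pos hc]
        obtain ⟨i, k, h1, h2, h3, h4⟩ := hcond.mp hc
        simp only [true_iff]
        exact ⟨i, j0, k, le_refl _, h1, h2, h3, h4⟩
      · rw [if_neg hc]
        -- the updated set is the set of the longer prefix
        have hset : (if (PySem.Set.ofList (arr.take j0)).contains (PySem.List.pyGetD arr (j0 : Int) 0)
              then PySem.Set.ofList (arr.take j0)
              else (PySem.Set.ofList (arr.take j0)).add (PySem.List.pyGetD arr (j0 : Int) 0))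
            = PySem.Set.ofList (arr.take (j0 + 1)) := by
          have htake : arr.take (j0 + 1) = arr.take j0 ++ [arr.getD j0 0] := by
            rw [List.take_add_one]
            congr 1
            rw [List.getElem?_eq_getElem (by omega), List.getD_eq_getElem _ _ (by omega)]
            rfl
          rw [htake, PySem.Set.ofList_append_singleton, PySem.List.pyGetD_natCast]
          by_cases h : (PySem.Set.ofList (arr.take j0)).contains (arr.getD j0 0)
          · rw [if_pos h]
            unfold PySem.Set.add
            rw [if_pos h]
          · rw [if_neg h]
        rw [hset]
        have hcast : (j0 : Int) + 1 = ((j0 + 1 : Nat) : Int) := by push_cast; ring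
        rw [hcast, ih (arr.length - (j0 + 1)) (by omega) (j0 + 1) rfl]
        constructor
        · rintro ⟨i, j, k, h0, h1, h2, h3, h4⟩
          exact ⟨i, j, k, by omega, h1, h2, h3, h4⟩
        · rintro ⟨i, j, k, h0, h1, h2, h3, h4⟩
          rcases Nat.lt_or_ge j0 j with hj | hj
          · exact ⟨i, j, k, by omega, h1, h2, h3, h4⟩
          · exfalso
            have hjeq : j = j0 := by omega
            subst hjeq
            exact hc (hcond.mpr ⟨i, k, h1, h2, h3, h4⟩)
    · rw [PySem.List.pyRange_one_eq_nil (by omega)]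
      rw [aLoop]
      simp only [Bool.false_eq_true, false_iff]
      rintro ⟨i, j, k, h0, h1, h2, h3, _⟩
      omega

lemma a_iff (arr : List Int) : hashmapOptimization arr = true ↔ HasTrip arr := by
  unfold hashmapOptimization
  have h := aLoop_iff arr (arr.length - 0) 0 rfl
  simp only [List.take_zero, Nat.cast_zero] at h
  have hof : PySem.Set.ofList ([] : List Int) = PySem.Set.empty := rfl
  rw [hof] at h
  rw [h]
  unfold HasTrip
  constructor
  · rintro ⟨i, j, k, _, h1, h2, h3, h4⟩; exact ⟨i, j, k, h1, h2, h3, h4⟩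
  · rintro ⟨i, j, k, h1, h2, h3, h4⟩; exact ⟨i, j, k, Nat.zero_le _, h1, h2, h3, h4⟩

lemma sorted_getD_mono (s : List Int) (hs : s.Pairwise (· ≤ ·)) {i j : Nat}
    (hij : i ≤ j) (hj : j < s.length) : s.getD i 0 ≤ s.getD j 0 := by
  rcases Nat.lt_or_ge i j with h | h
  · rw [List.getD_eq_getElem _ _ (by omega), List.getD_eq_getElem _ _ hj]
    exact List.pairwise_iff_getElem.mp hs i j (by omega) hj h
  · have : i = j := by omega
    subst this; rfl

-- two-pointer completeness on a sorted list: the while loop finds a pair summing to -x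
-- in [lo, hi] iff one exists
lemma bWhile_iff (s : List Int) (hs : s.Pairwise (· ≤ ·)) (x : Int) :
    ∀ n (lo hi : Nat), hi - lo = n → hi < s.length →
      (bWhile s x (lo : Int) (hi : Int) = true ↔
        ∃ i j : Nat, lo ≤ i ∧ i < j ∧ j ≤ hi ∧ x + s.getD i 0 + s.getD j 0 = 0) := by
  intro n
  induction n using Nat.strong_induction_on with
  | _ n ih =>
    intro lo hi hn hhi
    rw [bWhile]
    by_cases hlt : (lo : Int) < (hi : Int)
    · have hlohi : lo < hi := by exact_mod_cast hlt
      simp only [hlt, if_true]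
      rw [PySem.List.pyGetD_natCast, PySem.List.pyGetD_natCast]
      set t := x + s.getD lo 0 + s.getD hi 0 with ht
      by_cases h0 : t = 0
      · simp only [h0, if_true]
        constructor
        · intro _; exact ⟨lo, hi, le_refl _, hlohi, le_refl _, h0⟩
        · intro _; trivial
      · simp only [h0, if_false]
        by_cases hneg : t < 0
        · simp only [hneg, if_true]
          have hcast : (lo : Int) + 1 = ((lo + 1 : Nat) : Int) := by push_cast; ring
          rw [hcast, ih (hi - (lo+1)) (by omega) (lo+1) hi (by omega) hhi]
          constructor
          · rintro ⟨i, j, h1, h2, h3, h4⟩; exact ⟨i, j, by omega, h2, h3, h4⟩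
          · rintro ⟨i, j, h1, h2, h3, h4⟩
            rcases Nat.lt_or_ge lo i with hi' | hi'
            · exact ⟨i, j, by omega, h2, h3, h4⟩
            · exfalso
              have hieq : i = lo := by omega
              subst hieq
              have : s.getD j 0 ≤ s.getD hi 0 := sorted_getD_mono s hs h3 hhi
              omega
        · simp only [hneg, if_false]
          have hpos : 0 < t := by omega
          have hcast : (hi : Int) - 1 = ((hi - 1 : Nat) : Int) := by omega
          rw [hcast, ih (hi - 1 - lo) (by omega) lo (hi - 1) (by omega) (by omega)]
          constructor
          · rintro ⟨i, j, h1, h2, h3, h4⟩; exact ⟨i, j, h1, h2, by omega, h4⟩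
          · rintro ⟨i, j, h1, h2, h3, h4⟩
            rcases Nat.lt_or_ge j hi with hj' | hj'
            · exact ⟨i, j, h1, h2, by omega, h4⟩
            · exfalso
              have hjeq : j = hi := by omega
              subst hjeq
              have : s.getD lo 0 ≤ s.getD i 0 := sorted_getD_mono s hs h1 (by omega)
              omega
    · simp only [hlt, if_false]
      constructor
      · intro h; exact absurd h (by simp)
      · rintro ⟨i, j, h1, h2, h3, _⟩
        exfalso; have : lo < hi := by omega
        exact hlt (by exact_mod_cast this)

lemma b_iff (arr : List Int) :
    hashmapOptimization_alt arr = true ↔ HasTrip (PySem.List.sorted arr (fun x => x) false) := by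
  unfold hashmapOptimization_alt
  set s := PySem.List.sorted arr (fun x => x) false with hsdef
  have hs : s.Pairwise (· ≤ ·) := PySem.List.sorted_pairwise arr (fun x => x)
  simp only []
  rw [any_pyRange_iff]
  constructor
  · rintro ⟨p, hp0, hp2, hb⟩
    have hslen : (3 : Int) ≤ (s.length : Int) := by omega
    obtain ⟨pn, rfl⟩ : ∃ pn : Nat, (pn : Int) = p := ⟨p.toNat, by omega⟩
    have hcast1 : (pn : Int) + 1 = ((pn + 1 : Nat) : Int) := by push_cast; ring
    have hcast2 : ((s.length : Int) - 1) = ((s.length - 1 : Nat) : Int) := by omega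
    rw [hcast1, hcast2, PySem.List.pyGetD_natCast] at hb
    rw [bWhile_iff s hs _ _ (pn+1) (s.length - 1) rfl (by omega)] at hb
    obtain ⟨i, j, h1, h2, h3, h4⟩ := hb
    exact ⟨pn, i, j, by omega, h2, by omega, by
      rw [List.getD_eq_getElem _ _ (show pn < s.length by omega)] at h4 ⊢
      linarith⟩
  · rintro ⟨i, j, k, hij, hjk, hk, hsum⟩
    refine ⟨(i : Int), by omega, by omega, ?_⟩
    have hcast1 : (i : Int) + 1 = ((i + 1 : Nat) : Int) := by push_cast; ring
    have hcast2 : ((s.length : Int) - 1) = ((s.length - 1 : Nat) : Int) := by omega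
    rw [hcast1, hcast2, PySem.List.pyGetD_natCast]
    rw [bWhile_iff s hs _ _ (i+1) (s.length - 1) rfl (by omega)]
    exact ⟨j, k, by omega, hjk, by omega, by
      rw [List.getD_eq_getElem _ _ (show i < s.length by omega)]
      rw [List.getD_eq_getElem _ _ (show i < s.length by omega)] at hsum
      linarith⟩

lemma hasTrip_iff_subperm (xs : List Int) :
    HasTrip xs ↔ ∃ a b c : Int, List.Subperm [a, b, c] xs ∧ a + b + c = 0 := by
  constructor
  · rintro ⟨i, j, k, hij, hjk, hk, hsum⟩
    have hi : i < xs.length := by omega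
    have hj : j < xs.length := by omega
    refine ⟨xs[i], xs[j], xs[k], ?_, ?_⟩
    · refine List.Sublist.subperm ?_
      have := List.map_getElem_sublist (l := xs)
        (is := [⟨i, hi⟩, ⟨j, hj⟩, ⟨k, hk⟩]) ?_
      · simpa using this
      · simp [Fin.mk_lt_mk]
        omega
    · rw [List.getD_eq_getElem _ _ hi, List.getD_eq_getElem _ _ hj,
        List.getD_eq_getElem _ _ hk] at hsum
      exact hsum
  · rintro ⟨a, b, c, hsp, hsum⟩
    obtain ⟨l, hperm, hsub⟩ := hsp
    obtain ⟨is, hmap, hpw⟩ := List.sublist_eq_map_getElem hsub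
    have hlen : is.length = 3 := by
      have := congrArg List.length hmap
      simpa [hperm.length_eq] using this.symm
    obtain ⟨i, j, k, rfl⟩ := List.length_eq_three.mp hlen
    have hij : (i : Nat) < j ∧ (j : Nat) < k := by
      simp only [List.pairwise_cons, List.mem_cons,
        List.not_mem_nil, List.Pairwise.nil] at hpw
      exact ⟨hpw.1 j (Or.inl rfl), hpw.2.1 k (Or.inl rfl)⟩
    have hsuml : l.sum = 0 := by rw [hperm.sum_eq]; simp; linarith
    subst hmap
    refine ⟨i, j, k, hij.1, hij.2, k.isLt, ?_⟩
    rw [List.getD_eq_getElem _ _ i.isLt, List.getD_eq_getElem _ _ j.isLt,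
      List.getD_eq_getElem _ _ k.isLt]
    simp at hsuml; linarith

lemma hasTrip_perm {xs ys : List Int} (h : xs.Perm ys) : HasTrip xs ↔ HasTrip ys := by
  simp only [hasTrip_iff_subperm]
  constructor <;> rintro ⟨a, b, c, hsp, hsum⟩
  · exact ⟨a, b, c, hsp.trans h.subperm, hsum⟩
  · exact ⟨a, b, c, hsp.trans h.symm.subperm, hsum⟩

-- ===== VERDICT (by name: the statement is the Claim_ definition above) =====
theorem hashmapOptimization_spec : Claim_equal_hashmapOptimization := by
  intro arr _
  unfold Spec_hashmapOptimization
  rw [Bool.eq_iff_iff, a_iff, b_iff,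
    hasTrip_perm (PySem.List.sorted_perm arr (fun x => x) false)]
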